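-- pv_equiv track=rewrite | github.com/wzrabbit/algorithm-practice | BOJ/♣ 33000~33999/33937_태권도와_복싱을_합친_운동.py | get_syllable
-- ===== SOURCE A (Python) =====
-- vowels = ('a', 'e', 'i', 'o', 'u')
--
-- def get_syllable(string):
--     syllable = ""
--     has_vowel = False
--     success = False
--
--     for cur in string:
--         if cur in vowels:
--             has_vowel = True
--
--         if has_vowel and cur not in vowels:
--             success = True
--             break
--
--         syllable += cur
--
--     if not success:
--         return None
--
--     return syllable
-- ===== SOURCE B (Python) =====
-- VOWELS = "aeiou"
--
-- def get_syllable(string):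
--     n = len(string)
--     i = 0
--     while i < n and string[i] not in VOWELS:
--         i += 1
--     j = i
--     while j < n and string[j] in VOWELS:
--         j += 1
--     if i < n and j < n:
--         return string[:j]
--     return None
-- ===== Notes on version B (the rewrite author's own statement) =====
-- stated objective: idiomatic
-- what changed: Replaces A's single accumulator loop with boolean flags and string concatenation by two index scans (skip leading non-vowels, then skip the vowel run) and a single slice of the input.
import Mathlib
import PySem

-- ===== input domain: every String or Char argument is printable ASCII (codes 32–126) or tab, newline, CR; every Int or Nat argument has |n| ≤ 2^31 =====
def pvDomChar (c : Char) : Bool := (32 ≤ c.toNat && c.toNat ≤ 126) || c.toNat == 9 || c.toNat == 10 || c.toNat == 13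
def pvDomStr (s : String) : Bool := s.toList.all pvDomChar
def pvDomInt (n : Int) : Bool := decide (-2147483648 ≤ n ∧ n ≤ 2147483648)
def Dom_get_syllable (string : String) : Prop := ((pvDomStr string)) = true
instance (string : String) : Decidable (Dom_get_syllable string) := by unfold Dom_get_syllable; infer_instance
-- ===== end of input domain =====

-- B replaces A's accumulator loop (string concatenation + boolean flags) by two
-- index scans and one slice of the input; objective: idiomatic. Return values only.

def pvIsVowel (c : Char) : Bool :=
  c == 'a' || c == 'e' || c == 'i' || c == 'o' || c == 'u'

-- ===== PORT A =====
-- the for-loop of A: state = (syllable so far, has_vowel); break returns the syllable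
def pvGoA : List Char → List Char → Bool → Option String
  | [], _, _ => none
  | cur :: rest, syllable, hasVowel =>
    let hasVowel := hasVowel || pvIsVowel cur
    if hasVowel && !pvIsVowel cur then some (String.mk syllable)
    else pvGoA rest (syllable ++ [cur]) hasVowel

def get_syllable (string : String) : Option String :=
  pvGoA string.toList [] false

-- ===== PORT B =====
-- B: i = length of the leading non-vowel run, j-i = length of the vowel run after it,
-- return string[:j] iff i < n and j < n
def get_syllable_alt (string : String) : Option String :=
  let l := string.toList
  let i := (l.takeWhile (fun c => !pvIsVowel c)).length
  let j := i + ((l.drop i).takeWhile pvIsVowel).length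
  if i < l.length ∧ j < l.length then some (String.mk (l.take j)) else none

-- ===== PRECONDITION & SPEC =====
def Spec_get_syllable (string : String) (out : Option String) : Prop := out = get_syllable_alt string
instance (string : String) (out : Option String) : Decidable (Spec_get_syllable string out) := by unfold Spec_get_syllable; infer_instance

-- ===== CLAIM (what is proved, stated in full; the proofs are below) =====
def Claim_equal_get_syllable : Prop := ∀ (string : String), Dom_get_syllable string → Spec_get_syllable string (get_syllable string)

-- ===== LEMMAS AND PROOFS =====

-- vowel phase: once has_vowel is true, A stops at the end of the vowel run
theorem pvGoA_true (l acc : List Char) :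
    pvGoA l acc true =
      (if (l.takeWhile pvIsVowel).length < l.length
       then some (String.mk (acc ++ l.takeWhile pvIsVowel)) else none) := by
  induction l generalizing acc with
  | nil => simp [pvGoA]
  | cons c rest ih =>
    by_cases hv : pvIsVowel c = true
    · simp [pvGoA, hv, ih (acc ++ [c])]
    · simp [pvGoA, hv]

-- consonant phase, generalized over the accumulator
theorem pvGoA_false (l acc : List Char) :
    pvGoA l acc false =
      (let i := (l.takeWhile (fun c => !pvIsVowel c)).length
       let j := i + ((l.drop i).takeWhile pvIsVowel).length
       if i < l.length ∧ j < l.length then some (String.mk (acc ++ l.take j)) else none) := by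
  induction l generalizing acc with
  | nil => simp [pvGoA]
  | cons c rest ih =>
    by_cases hv : pvIsVowel c = true
    · -- first vowel found: switch to the vowel phase
      have h1 : pvGoA (c :: rest) acc false = pvGoA rest (acc ++ [c]) true := by
        simp [pvGoA, hv]
      have h2 : rest.take (rest.takeWhile pvIsVowel).length = rest.takeWhile pvIsVowel :=
        (List.prefix_iff_eq_take.mp (List.takeWhile_prefix pvIsVowel)).symm
      rw [h1, pvGoA_true]
      simp [hv, List.take_succ_cons, h2]
    · -- still a leading consonant
      have h1 : pvGoA (c :: rest) acc false = pvGoA rest (acc ++ [c]) false := by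
        simp [pvGoA, hv]
      rw [h1, ih (acc ++ [c])]
      simp only [List.takeWhile_cons, hv]
      simp [Nat.add_assoc, Nat.one_add]
      simp [show ∀ a b : Nat, a + (b + 1) = (a + b) + 1 from
        fun a b => by omega, List.take_succ_cons]

-- ===== VERDICT (by name: the statement is the Claim_ definition above) =====
theorem get_syllable_spec : Claim_equal_get_syllable := by
  intro s _
  unfold Spec_get_syllable get_syllable get_syllable_alt
  rw [pvGoA_false]
  simp
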